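-- pv_equiv track=rewrite | github.com/Danlugo/farmafacil | src/farmafacil/services/ai_responder.py | _parse_admin_action
-- ===== SOURCE A (Python) =====
-- def _parse_admin_action(reply: str) -> tuple[str, dict[str, str]]:
--     """Parse an App Admin LLM reply into (action, fields).
--
--     The admin LLM is instructed to emit either::
--
--         ACTION: TOOL_CALL
--         TOOL: <tool_name>
--         ARGS: <json_object>
--
--     OR::
--
--         ACTION: FINAL
--         RESPONSE: <text shown to the user>
--
--     We parse loosely to be robust to minor format drift — the RESPONSE /
--     ARGS values can span multiple lines, so everything after the key marker
--     is consumed until the next recognised key OR end of string.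
--     """
--     fields: dict[str, str] = {}
--     current_key: str | None = None
--     buffer: list[str] = []
--     keys = ("ACTION", "TOOL", "ARGS", "RESPONSE")
--     for line in reply.splitlines():
--         stripped = line.strip()
--         matched_key = None
--         for key in keys:
--             prefix = f"{key}:"
--             if stripped.upper().startswith(prefix):
--                 matched_key = key
--                 break
--         if matched_key:
--             if current_key is not None:
--                 fields[current_key] = "\n".join(buffer).strip()
--             current_key = matched_key
--             # Take whatever is after the "KEY:" marker on the same line
--             buffer = [stripped[len(matched_key) + 1 :].strip()]
--         else:
--             if current_key is not None:
--                 buffer.append(line)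
--     if current_key is not None:
--         fields[current_key] = "\n".join(buffer).strip()
--     action = fields.pop("ACTION", "").upper() or "FINAL"
--     return action, fields
-- ===== SOURCE B (Python) =====
-- def _parse_admin_action(reply: str) -> tuple[str, dict[str, str]]:
--     """Boundary-scan re-implementation: one pass records key-line boundaries,
--     then each field value is assembled by slicing between boundaries."""
--     keys = ("ACTION", "TOOL", "ARGS", "RESPONSE")
--     lines = reply.splitlines()
--     bounds = []  # (line index, key, stripped remainder of the key line)
--     for i, line in enumerate(lines):
--         s = line.strip()
--         u = s.upper()
--         for key in keys:
--             if u.startswith(key + ":"):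
--                 bounds.append((i, key, s[len(key) + 1:].strip()))
--                 break
--     fields = {}
--     for j, (i, key, head) in enumerate(bounds):
--         end = bounds[j + 1][0] if j + 1 < len(bounds) else len(lines)
--         fields[key] = "\n".join([head] + lines[i + 1:end]).strip()
--     action = fields.pop("ACTION", "").upper() or "FINAL"
--     return action, fields
-- ===== Notes on version B (the rewrite author's own statement) =====
-- stated objective: alternative
-- what changed: Replaces A's stateful single pass (current-key/buffer accumulator with flushes) by a two-phase boundary scan: first record the index, key and stripped remainder of every key line, then build each field by slicing the raw lines between consecutive boundaries.
import Mathlib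
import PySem

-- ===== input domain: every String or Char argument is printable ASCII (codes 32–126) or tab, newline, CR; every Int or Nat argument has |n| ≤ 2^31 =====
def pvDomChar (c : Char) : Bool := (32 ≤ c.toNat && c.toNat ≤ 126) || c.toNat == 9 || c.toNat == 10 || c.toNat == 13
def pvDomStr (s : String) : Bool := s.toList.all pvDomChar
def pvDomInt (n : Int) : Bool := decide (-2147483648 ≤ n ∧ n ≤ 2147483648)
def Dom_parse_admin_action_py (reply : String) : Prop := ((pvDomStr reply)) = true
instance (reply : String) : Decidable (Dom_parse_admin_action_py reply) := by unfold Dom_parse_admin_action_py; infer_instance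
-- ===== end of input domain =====

-- B replaces A's stateful single pass (current-key/buffer with flushes) by a two-phase boundary
-- scan: record every key line's index/key/remainder, then slice the raw lines between boundaries
-- (objective: alternative decomposition, same cost).

-- shared helpers (both Pythons match a key line and take the remainder identically)
-- the inner 'for key in keys: if stripped.upper().startswith(key + ":")' loop, prefixes precomputed
def pvFindKey (stripped : String) : Option String :=
  (([("ACTION", "ACTION:"), ("TOOL", "TOOL:"), ("ARGS", "ARGS:"), ("RESPONSE", "RESPONSE:")].find?
      (fun kp => PySem.Str.startswith (PySem.Str.upper stripped) kp.2))).map (·.1)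

-- stripped[len(key) + 1:].strip()
def pvHead (stripped k : String) : String :=
  PySem.Str.strip (PySem.Str.slice stripped (some ((PySem.Str.len k : Int) + 1)) none)

-- the shared tail 'action = fields.pop("ACTION", "").upper() or "FINAL"; return action, fields'
def pvFinish (fields : PySem.Dict String String) : String × (List (String × String)) :=
  let a := PySem.Str.upper ((PySem.Dict.get? fields "ACTION").getD "")
  ((if a = "" then "FINAL" else a), (PySem.Dict.erase fields "ACTION").items)

-- ===== PORT A =====
-- A's main loop: state (fields, current_key, buffer), flush on each new key line and at the end
def pvLoopA : List String → PySem.Dict String String → Option String → List String →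
    PySem.Dict String String
  | [], fields, cur, buf =>
      match cur with
      | some ck => fields.insert ck (PySem.Str.strip (PySem.Str.join "\n" buf))
      | none => fields
  | line :: rest, fields, cur, buf =>
      let stripped := PySem.Str.strip line
      match pvFindKey stripped with
      | some k =>
          let fields' := match cur with
            | some ck => fields.insert ck (PySem.Str.strip (PySem.Str.join "\n" buf))
            | none => fields
          pvLoopA rest fields' (some k) [pvHead stripped k]
      | none =>
          match cur with
          | some _ => pvLoopA rest fields cur (buf ++ [line])
          | none => pvLoopA rest fields cur buf

def parse_admin_action_py (reply : String) : String × (List (String × String)) :=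
  pvFinish (pvLoopA (PySem.Str.splitlines reply) PySem.Dict.empty none [])

-- ===== PORT B =====
-- phase 1: boundaries — (line index, key, stripped remainder of the key line)
def pvBoundsB : Nat → List String → List (Nat × String × String)
  | _, [] => []
  | i, line :: rest =>
      let s := PySem.Str.strip line
      match pvFindKey s with
      | some k => (i, k, pvHead s k) :: pvBoundsB (i + 1) rest
      | none => pvBoundsB (i + 1) rest

-- 'bounds[j + 1][0] if j + 1 < len(bounds) else len(lines)', phrased on the remaining bounds
def pvEnd (lines : List String) : List (Nat × String × String) → Nat
  | [] => lines.length
  | (i, _, _) :: _ => i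

-- phase 2: each field = head chunk ++ raw lines up to the next boundary (or end), joined, stripped
def pvFillB (lines : List String) : List (Nat × String × String) → PySem.Dict String String →
    PySem.Dict String String
  | [], fields => fields
  | (i, k, head) :: rest, fields =>
      pvFillB lines rest (fields.insert k (PySem.Str.strip (PySem.Str.join "\n"
        (head :: PySem.List.slice lines (some ((i + 1 : Nat) : Int)) (some (pvEnd lines rest : Int))))))

def parse_admin_action_py_alt (reply : String) : String × (List (String × String)) :=
  let lines := PySem.Str.splitlines reply
  pvFinish (pvFillB lines (pvBoundsB 0 lines) PySem.Dict.empty)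

-- ===== PRECONDITION & SPEC =====
def Spec_parse_admin_action_py (reply : String) (out : String × (List (String × String))) : Prop := out = parse_admin_action_py_alt reply
instance (reply : String) (out : String × (List (String × String))) : Decidable (Spec_parse_admin_action_py reply out) := by unfold Spec_parse_admin_action_py; infer_instance

-- ===== CLAIM (what is proved, stated in full; the proofs are below) =====
def Claim_equal_parse_admin_action_py : Prop := ∀ (reply : String), Dom_parse_admin_action_py reply → Spec_parse_admin_action_py reply (parse_admin_action_py reply)

-- ===== LEMMAS AND PROOFS =====

theorem pvDropSucc {lines : List String} {l : String} {rest : List String} {i : Nat}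
    (h : lines.drop i = l :: rest) : lines.drop (i + 1) = rest := by
  rw [← List.tail_drop, h]; rfl

theorem pvBounds_ge (ls : List String) : ∀ (i : Nat) (p : Nat × String × String),
    p ∈ pvBoundsB i ls → i ≤ p.1 := by
  induction ls with
  | nil => intro i p h; simp [pvBoundsB] at h
  | cons l rest ih =>
      intro i p h
      simp only [pvBoundsB] at h
      cases hk : pvFindKey (PySem.Str.strip l) with
      | some k =>
          rw [hk] at h
          rcases List.mem_cons.mp h with h1 | h2
          · subst h1; simp
          · exact le_trans (Nat.le_succ i) (ih (i + 1) p h2)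
      | none => rw [hk] at h; exact le_trans (Nat.le_succ i) (ih (i + 1) p h)

theorem pvSlice_eq_takeWhile (lines : List String) : ∀ (ls : List String) (i : Nat),
    lines.drop i = ls →
    PySem.List.slice lines (some (i : Int)) (some (pvEnd lines (pvBoundsB i ls) : Int)) =
      ls.takeWhile (fun l => (pvFindKey (PySem.Str.strip l)).isNone) := by
  intro ls
  induction ls with
  | nil =>
      intro i h
      simp only [pvBoundsB, pvEnd, PySem.List.slice_natCast, h, List.take_nil, List.takeWhile_nil]
  | cons l rest ih =>
      intro i h
      have hdrop := pvDropSucc h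
      have hlen : i < lines.length := by
        by_contra hc
        rw [List.drop_eq_nil_of_le (by omega)] at h
        simp at h
      cases hk : pvFindKey (PySem.Str.strip l) with
      | some k =>
          simp [pvBoundsB, hk, pvEnd, PySem.List.slice_natCast]
      | none =>
          have he : i + 1 ≤ pvEnd lines (pvBoundsB (i + 1) rest) := by
            cases hb : pvBoundsB (i + 1) rest with
            | nil => simp only [pvEnd]; omega
            | cons p bs =>
                obtain ⟨j, k', h'⟩ := p
                have := pvBounds_ge rest (i + 1) (j, k', h') (by rw [hb]; simp)
                simpa [pvEnd] using this
          have h2 := ih (i + 1) hdrop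
          rw [PySem.List.slice_natCast, hdrop] at h2
          simp only [pvBoundsB, hk, PySem.List.slice_natCast, h, List.takeWhile_cons,
            Option.isNone_none, if_true]
          have hsub : pvEnd lines (pvBoundsB (i + 1) rest) - i
              = (pvEnd lines (pvBoundsB (i + 1) rest) - (i + 1)) + 1 := by omega
          rw [hsub, List.take_succ_cons, h2]

theorem pvLoop_some (lines : List String) : ∀ (ls : List String) (i : Nat)
    (d : PySem.Dict String String) (k : String) (buf : List String),
    lines.drop i = ls →
    pvLoopA ls d (some k) buf =
      pvFillB lines (pvBoundsB i ls)
        (d.insert k (PySem.Str.strip (PySem.Str.join "\n"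
          (buf ++ ls.takeWhile (fun l => (pvFindKey (PySem.Str.strip l)).isNone))))) := by
  intro ls
  induction ls with
  | nil => intro i d k buf h; simp [pvLoopA, pvBoundsB, pvFillB]
  | cons l rest ih =>
      intro i d k buf h
      have hdrop := pvDropSucc h
      have hs := pvSlice_eq_takeWhile lines rest (i + 1) hdrop
      cases hk : pvFindKey (PySem.Str.strip l) with
      | some k2 =>
          simp only [pvLoopA, pvBoundsB, hk, List.takeWhile_cons, Option.isNone_some,
            Bool.false_eq_true, if_false, List.append_nil, pvFillB]
          rw [ih (i + 1) _ k2 [pvHead (PySem.Str.strip l) k2] hdrop]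
          rw [hs, List.singleton_append]
      | none =>
          simp only [pvLoopA, pvBoundsB, hk, List.takeWhile_cons, Option.isNone_none, if_true]
          rw [ih (i + 1) d k (buf ++ [l]) hdrop]
          simp only [List.append_assoc, List.singleton_append]

theorem pvLoop_none (lines : List String) : ∀ (ls : List String) (i : Nat)
    (d : PySem.Dict String String) (buf : List String),
    lines.drop i = ls →
    pvLoopA ls d none buf = pvFillB lines (pvBoundsB i ls) d := by
  intro ls
  induction ls with
  | nil => intro i d buf h; simp [pvLoopA, pvBoundsB, pvFillB]
  | cons l rest ih =>
      intro i d buf h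
      have hdrop := pvDropSucc h
      have hs := pvSlice_eq_takeWhile lines rest (i + 1) hdrop
      cases hk : pvFindKey (PySem.Str.strip l) with
      | some k2 =>
          simp only [pvLoopA, pvBoundsB, hk, pvFillB]
          rw [pvLoop_some lines rest (i + 1) d k2 [pvHead (PySem.Str.strip l) k2] hdrop]
          rw [hs, List.singleton_append]
      | none =>
          simp only [pvLoopA, pvBoundsB, hk]
          exact ih (i + 1) d buf hdrop

-- ===== VERDICT (by name: the statement is the Claim_ definition above) =====
theorem parse_admin_action_py_spec : Claim_equal_parse_admin_action_py := by
  intro reply _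
  unfold Spec_parse_admin_action_py parse_admin_action_py parse_admin_action_py_alt
  rw [pvLoop_none (PySem.Str.splitlines reply) (PySem.Str.splitlines reply) 0 _ [] (by simp)]
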